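-- pv_equiv track=rewrite | github.com/kuku-forum/Algorithm-study | programmers/카카오/괄호변환_정호제.py | balanced_bracket
-- ===== SOURCE A (Python) =====
-- def balanced_bracket(w):
--     if not w:
--         return '', ''
--
--     chk = 0
--     for i, brk in enumerate(w):
--         if brk == '(':
--             chk += 1
--         else:
--             chk -= 1
--
--         if chk == 0:
--             return w[:i+1] , w[i+1:]
-- ===== SOURCE B (Python) =====
-- def balanced_bracket(w):
--     if not w:
--         return '', ''
--     acc = []
--     s = 0
--     for c in w:
--         s += 1 if c == '(' else -1
--         acc.append(s)
--     if 0 in acc: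
--         i = acc.index(0) + 1
--         return w[:i], w[i:]
-- ===== Notes on version B (the rewrite author's own statement) =====
-- stated objective: alternative
-- what changed: B materialises the whole prefix-balance list in a first pass and then locates the split point with list.index(0), instead of A's early return from inside the scan.
-- outside the precondition, e.g. on balanced_bracket('(('): A returns None, B returns None
import Mathlib
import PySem

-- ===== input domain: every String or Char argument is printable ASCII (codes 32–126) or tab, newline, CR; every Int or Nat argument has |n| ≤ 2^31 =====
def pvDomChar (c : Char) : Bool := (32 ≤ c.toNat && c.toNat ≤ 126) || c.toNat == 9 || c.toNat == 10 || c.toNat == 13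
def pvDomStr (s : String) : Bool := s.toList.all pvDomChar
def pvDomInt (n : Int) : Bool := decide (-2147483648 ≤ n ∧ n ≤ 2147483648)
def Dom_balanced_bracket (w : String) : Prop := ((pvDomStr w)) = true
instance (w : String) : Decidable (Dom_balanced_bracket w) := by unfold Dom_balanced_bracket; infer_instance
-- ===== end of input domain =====

-- B replaces A's early-return scan by a two-phase decomposition (prefix-balance list, then index of 0); same O(n) cost, return values proved equal on Pre_.

-- ===== PORT A =====
-- A's for-loop with enumerate: index i, running chk; 'none' = Python falls through and returns None (excluded by Pre_).
def pvLoopA (w : List Char) : List Char → Nat → Int → Option (String × String)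
  | [], _, _ => none
  | brk :: rest, i, chk =>
    let chk' := if brk = '(' then chk + 1 else chk - 1
    if chk' = 0 then
      some (String.ofList (PySem.List.slice w none (some ((i : Int) + 1))),
            String.ofList (PySem.List.slice w (some ((i : Int) + 1)) none))
    else pvLoopA w rest (i + 1) chk'

def balanced_bracket (w : String) : String × String :=
  if w.toList = [] then ("", "")
  else (pvLoopA w.toList w.toList 0 0).getD ("", "")

-- ===== PORT B =====
-- the list 'acc' of Source B: running balances of all non-empty prefixes
def pvAccList : List Char → Int → List Int
  | [], _ => []
  | c :: cs, s =>
    let s' := s + (if c = '(' then 1 else -1)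
    s' :: pvAccList cs s'

def balanced_bracket_alt (w : String) : String × String :=
  if w.toList = [] then ("", "")
  else
    let acc := pvAccList w.toList 0
    if (0 : Int) ∈ acc then
      match PySem.List.index? acc 0 with
      | some j => (String.ofList (w.toList.take (j + 1)), String.ofList (w.toList.drop (j + 1)))
      | none => ("", "")   -- unreachable: index? is some when 0 ∈ acc
    else ("", "")          -- Python B returns None here; excluded by Pre_

-- ===== PRECONDITION & SPEC =====
-- Pre_ excludes the strings on which no prefix ever balances: there both Pythons fall
-- through and return None, which is not a value of the declared pair type.
def Pre_balanced_bracket (w : String) : Prop :=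
  w.toList = [] ∨
  ∃ k ∈ List.range (w.toList.length + 1), 0 < k ∧ 2 * ((w.toList.take k).count '(') = k

instance (w : String) : Decidable (Pre_balanced_bracket w) := by
  unfold Pre_balanced_bracket; infer_instance

def pvWitness_balanced_bracket : String := "()"

def Spec_balanced_bracket (w : String) (out : String × String) : Prop := out = balanced_bracket_alt w
instance (w : String) (out : String × String) : Decidable (Spec_balanced_bracket w out) := by unfold Spec_balanced_bracket; infer_instance

-- ===== CLAIM (what is proved, stated in full; the proofs are below) =====
def Claim_equal_balanced_bracket : Prop := ∀ (w : String), Dom_balanced_bracket w → Pre_balanced_bracket w → Spec_balanced_bracket w (balanced_bracket w)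

-- ===== LEMMAS AND PROOFS =====

theorem pvAccList_length (l : List Char) (s : Int) : (pvAccList l s).length = l.length := by
  induction l generalizing s with
  | nil => rfl
  | cons c cs ih => simp [pvAccList, ih]

theorem pvAccList_getElem (l : List Char) (s : Int) (k : Nat) (hk : k < l.length) :
    (pvAccList l s)[k]'(by rw [pvAccList_length]; exact hk) =
      s + 2 * (((l.take (k + 1)).count '(' : Nat) : Int) - (k + 1 : Nat) := by
  induction l generalizing s k with
  | nil => simp at hk
  | cons c cs ih =>
    cases k with
    | zero =>
      by_cases hc : c = '(' <;>
        simp [pvAccList, hc] <;> omega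
    | succ k =>
      have hk' : k < cs.length := by simpa using hk
      simp only [pvAccList, List.getElem_cons_succ]
      rw [ih _ k hk']
      simp only [List.take_succ_cons, List.count_cons]
      by_cases hc : c = '(' <;> simp [hc] <;> omega

theorem pvAccList_mem_zero (l : List Char) :
    (0 : Int) ∈ pvAccList l 0 ↔
      ∃ k ∈ List.range (l.length + 1), 0 < k ∧ 2 * ((l.take k).count '(') = k := by
  rw [List.mem_iff_getElem]
  constructor
  · rintro ⟨k, hk, hget⟩
    have hk' : k < l.length := by rw [pvAccList_length] at hk; exact hk
    rw [pvAccList_getElem l 0 k hk'] at hget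
    refine ⟨k + 1, by simp [List.mem_range]; omega, by omega, ?_⟩
    omega
  · rintro ⟨k, hkr, hk0, hcnt⟩
    have hkl : k ≤ l.length := by simp [List.mem_range] at hkr; omega
    obtain ⟨m, rfl⟩ : ∃ m, k = m + 1 := ⟨k - 1, by omega⟩
    have hm : m < l.length := by omega
    refine ⟨m, by rw [pvAccList_length]; exact hm, ?_⟩
    rw [pvAccList_getElem l 0 m hm]
    omega

-- A's loop equals "index of first 0 in the balance list", with slices at the found index.
theorem pvLoopA_eq_index (w : List Char) (rest : List Char) :
    ∀ (i : Nat) (chk : Int),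
      pvLoopA w rest i chk =
        (PySem.List.index? (pvAccList rest chk) 0).map
          (fun j => (String.ofList (PySem.List.slice w none (some ((i + j + 1 : Nat) : Int))),
                     String.ofList (PySem.List.slice w (some ((i + j + 1 : Nat) : Int)) none))) := by
  induction rest with
  | nil => intro i chk; simp [pvLoopA, pvAccList, PySem.List.index?]
  | cons c cs ih =>
    intro i chk
    by_cases h0 : chk + (if c = '(' then 1 else -1) = 0
    · have h0' : (if c = '(' then chk + 1 else chk - 1) = 0 := by
        by_cases hc : c = '(' <;> simp [hc] at h0 ⊢ <;> omega
      rw [pvLoopA, pvAccList]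
      simp only [h0, h0']
      rw [PySem.List.index?_cons_self]
      simp [Nat.cast_add]
    · have h0' : (if c = '(' then chk + 1 else chk - 1) ≠ 0 := by
        by_cases hc : c = '(' <;> simp [hc] at h0 ⊢ <;> omega
      have hs : (chk + if c = '(' then 1 else -1) = (if c = '(' then chk + 1 else chk - 1) := by
        by_cases hc : c = '(' <;> simp [hc]; ring
      rw [pvLoopA, pvAccList]
      simp only [hs, if_neg h0']
      rw [PySem.List.index?_cons_of_ne _ h0']
      rw [ih (i + 1)]
      rw [Option.map_map]
      congr 1
      funext j
      have : i + 1 + j + 1 = i + (j + 1) + 1 := by omega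
      simp [Function.comp, this]

theorem pv_eq_everywhere (w : String) (hpre : Pre_balanced_bracket w) :
    balanced_bracket w = balanced_bracket_alt w := by
  unfold balanced_bracket balanced_bracket_alt
  by_cases hnil : w.toList = []
  · simp [hnil]
  · simp only [if_neg hnil]
    have hmem : (0 : Int) ∈ pvAccList w.toList 0 := by
      rw [pvAccList_mem_zero]
      rcases hpre with h | h
      · exact absurd h hnil
      · exact h
    have hsome : ∃ j, PySem.List.index? (pvAccList w.toList 0) 0 = some j := by
      have := (PySem.List.index?_isSome_iff (xs := pvAccList w.toList 0) (v := 0)).mpr hmem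
      exact Option.isSome_iff_exists.mp this
    obtain ⟨j, hj⟩ := hsome
    rw [pvLoopA_eq_index, hj]
    simp only [Option.map_some, Option.getD_some, if_pos hmem]
    have h1 : PySem.List.slice w.toList none (some ((0 + j + 1 : Nat) : Int)) = w.toList.take (j + 1) := by
      rw [PySem.List.slice_to_natCast]; simp
    have h2 : PySem.List.slice w.toList (some ((0 + j + 1 : Nat) : Int)) none = w.toList.drop (j + 1) := by
      rw [PySem.List.slice_from_natCast]; simp
    rw [h1, h2]

-- ===== VERDICT (by name: the statement is the Claim_ definition above) =====
theorem balanced_bracket_spec : Claim_equal_balanced_bracket := by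
  intro w _ hpre
  unfold Spec_balanced_bracket
  exact pv_eq_everywhere w hpre
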